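-- pv_equiv track=rewrite | github.com/Ashishkumar448/GFG-Problem-of-the-day | 2025-07-July-GFG-POTD/July 18 - LCM Triplet/Solution.py | lcmTriplets
-- ===== SOURCE A (Python) =====
-- def lcmTriplets(n: int) -> int:
--     if n == 1:
--         return 1
--     if n == 2:
--         return 2
--     if n == 3:
--         return 6
--
--     def gcd(a, b):
--         while b:
--             a, b = b, a % b
--         return a
--
--     def lcm(a, b):
--         return (a * b) // gcd(a, b)
--
--     if n % 2 != 0:
--         result = lcm(n, lcm(n - 1, n - 2))
--     else:
--         l1 = lcm(n, lcm(n - 1, n - 3))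
--         l2 = lcm(n, lcm(n - 1, n - 2))
--         l3 = lcm(n - 1, lcm(n - 2, n - 3))
--         result = max(l1, l2, l3)
--
--     return result
-- ===== SOURCE B (Python) =====
-- def lcmTriplets(n: int) -> int:
--     # Closed form: the maximum LCM of three distinct numbers from 1..n.
--     if n == 1:
--         return 1
--     if n == 2:
--         return 2
--     if n % 2 == 1:
--         return n * (n - 1) * (n - 2)
--     if n % 3 != 0:
--         return n * (n - 1) * (n - 3)
--     return (n - 1) * (n - 2) * (n - 3)
-- ===== Notes on version B (the rewrite author's own statement) =====
-- stated objective: simpler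
-- what changed: Replaces A's hand-rolled gcd/lcm computations and the max over three nested lcm candidates by the known O(1) closed-form case analysis (n odd; n even and not divisible by 3; n divisible by 6), with no gcd computation at all.
-- outside the precondition, e.g. on lcmTriplets(0): A returns 0, B returns -6; on lcmTriplets(-2): A returns -12, B returns -30
import Mathlib
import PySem

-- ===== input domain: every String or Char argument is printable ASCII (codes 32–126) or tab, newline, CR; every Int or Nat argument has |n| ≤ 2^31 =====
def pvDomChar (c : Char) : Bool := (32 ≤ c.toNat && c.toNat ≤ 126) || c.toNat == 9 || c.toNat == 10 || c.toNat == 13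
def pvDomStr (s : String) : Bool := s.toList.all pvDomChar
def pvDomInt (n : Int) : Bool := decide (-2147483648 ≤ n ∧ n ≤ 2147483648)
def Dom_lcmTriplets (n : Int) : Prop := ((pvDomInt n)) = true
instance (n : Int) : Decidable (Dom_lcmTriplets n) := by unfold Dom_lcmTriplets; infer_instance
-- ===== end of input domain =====

-- B replaces A's hand-rolled gcd/lcm evaluations and three-way max by the O(1) closed-form
-- case analysis (n odd / n even not divisible by 3 / n divisible by 6); objective: simpler.

-- ===== PORT A =====
-- Python inner helper `gcd` (while b: a, b = b, a % b)
def pyGcdA (a b : Int) : Int :=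
  if _h : b = 0 then a
  else pyGcdA b (PySem.Int.mod a b)
termination_by b.natAbs
decreasing_by
  rcases lt_or_gt_of_ne _h with hb | hb
  · have h1 := PySem.Int.mod_neg_bounds a hb
    omega
  · have h1 := PySem.Int.mod_nonneg a hb
    have h2 := PySem.Int.mod_lt a hb
    omega

-- Python inner helper `lcm` ((a * b) // gcd(a, b)); inside Pre_ the divisor is never 0
def pyLcmA (a b : Int) : Int := PySem.Int.floordiv (a * b) (pyGcdA a b)

def lcmTriplets (n : Int) : Int :=
  if n = 1 then 1
  else if n = 2 then 2
  else if n = 3 then 6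
  else if PySem.Int.mod n 2 ≠ 0 then
    pyLcmA n (pyLcmA (n - 1) (n - 2))
  else
    let l1 := pyLcmA n (pyLcmA (n - 1) (n - 3))
    let l2 := pyLcmA n (pyLcmA (n - 1) (n - 2))
    let l3 := pyLcmA (n - 1) (pyLcmA (n - 2) (n - 3))
    max l1 (max l2 l3)

-- ===== PORT B =====
def lcmTriplets_alt (n : Int) : Int :=
  if n = 1 then 1
  else if n = 2 then 2
  else if PySem.Int.mod n 2 = 1 then n * (n - 1) * (n - 2)
  else if PySem.Int.mod n 3 ≠ 0 then n * (n - 1) * (n - 3)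
  else (n - 1) * (n - 2) * (n - 3)

-- ===== PRECONDITION & SPEC =====
-- Pre_ excludes n ≤ 0, outside the task's natural domain (triplets from {1..n}); A still returns
-- values there, but they are accidents of running its gcd/lcm helpers on nonpositive ints, and
-- B's closed form does not reproduce them.
def Pre_lcmTriplets (n : Int) : Prop := 1 ≤ n
instance (n : Int) : Decidable (Pre_lcmTriplets n) := by unfold Pre_lcmTriplets; infer_instance
def pvWitness_lcmTriplets : Int := 10

def Spec_lcmTriplets (n : Int) (out : Int) : Prop := out = lcmTriplets_alt n
instance (n : Int) (out : Int) : Decidable (Spec_lcmTriplets n out) := by unfold Spec_lcmTriplets; infer_instance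

-- ===== CLAIM (what is proved, stated in full; the proofs are below) =====
def Claim_equal_lcmTriplets : Prop := ∀ (n : Int), Dom_lcmTriplets n → Pre_lcmTriplets n → Spec_lcmTriplets n (lcmTriplets n)

-- ===== LEMMAS AND PROOFS =====

-- A's Euclidean loop computes Nat.gcd on nonnegative inputs.
theorem pyGcdA_natCast (b a : Nat) : pyGcdA (a : Int) (b : Int) = (Nat.gcd a b : Int) := by
  induction b using Nat.strong_induction_on generalizing a with
  | _ b ih =>
    rw [pyGcdA]
    by_cases hb : (b : Int) = 0
    · have : b = 0 := by omega
      subst this; simp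
    · have hb' : b ≠ 0 := by omega
      simp only [hb, dite_false, PySem.Int.mod_natCast]
      rw [ih (a % b) (Nat.mod_lt a (Nat.pos_of_ne_zero hb')) b]
      rw [Nat.gcd_comm b, ← Nat.gcd_rec, Nat.gcd_comm]

-- A's lcm helper on nonnegative inputs.
theorem pyLcmA_natCast (a b : Nat) : pyLcmA (a : Int) (b : Int) = ((a * b / Nat.gcd a b : Nat) : Int) := by
  rw [pyLcmA, pyGcdA_natCast]
  exact_mod_cast PySem.Int.floordiv_natCast (a * b) (Nat.gcd a b)

theorem cop_succ (k : Nat) : Nat.gcd (k+1) k = 1 := by simp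

-- A's odd branch: lcm(m, lcm(m-1, m-2)) = m(m-1)(m-2) for odd m ≥ 3.
theorem odd_branch (m : Nat) (h : 3 ≤ m) (ho : ¬ 2 ∣ m) :
    m * ((m - 1) * (m - 2) / Nat.gcd (m - 1) (m - 2)) /
      Nat.gcd m ((m - 1) * (m - 2) / Nat.gcd (m - 1) (m - 2)) = m * (m - 1) * (m - 2) := by
  obtain ⟨k, rfl⟩ : ∃ k, m = k + 3 := ⟨m - 3, by omega⟩
  simp only [show k+3-1 = k+2 from by omega, show k+3-2 = k+1 from by omega]
  rw [show Nat.gcd (k+2) (k+1) = 1 from cop_succ (k+1), Nat.div_one]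
  have c1 : Nat.Coprime (k+3) (k+2) := cop_succ (k+2)
  have c2 : Nat.Coprime (k+3) (k+1) := by
    rw [Nat.Coprime, show k+3 = 2 + (k+1) from by omega, Nat.gcd_add_self_left]
    exact (Nat.coprime_two_left).mpr (Nat.odd_iff.mpr (by omega))
  rw [Nat.Coprime.gcd_eq_one (Nat.Coprime.mul_right c1 c2), Nat.div_one]; ring

-- A's even-branch l2: lcm(m, lcm(m-1, m-2)) = (m/2)(m-1)(m-2) for even m ≥ 4.
theorem even_branch_l2 (m : Nat) (h : 4 ≤ m) (he : 2 ∣ m) :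
    m * ((m - 1) * (m - 2) / Nat.gcd (m - 1) (m - 2)) /
      Nat.gcd m ((m - 1) * (m - 2) / Nat.gcd (m - 1) (m - 2)) = m / 2 * ((m - 1) * (m - 2)) := by
  obtain ⟨k, rfl⟩ : ∃ k, m = k + 4 := ⟨m - 4, by omega⟩
  simp only [show k+4-1 = k+3 from by omega, show k+4-2 = k+2 from by omega]
  rw [show Nat.gcd (k+3) (k+2) = 1 from cop_succ (k+2), Nat.div_one]
  have c1 : Nat.Coprime (k+4) (k+3) := cop_succ (k+3)
  have g2 : Nat.gcd (k+4) (k+2) = 2 := by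
    rw [show k+4 = 2 + (k+2) from by omega, Nat.gcd_add_self_left]
    exact Nat.gcd_eq_left (by omega)
  rw [Nat.gcd_mul_right_right_of_gcd_eq_one c1, g2, Nat.mul_div_right_comm (by omega)]

-- A's even-branch l3: lcm(m-1, lcm(m-2, m-3)) = (m-1)(m-2)(m-3) for even m ≥ 4.
theorem even_branch_l3 (m : Nat) (h : 4 ≤ m) (he : 2 ∣ m) :
    (m - 1) * ((m - 2) * (m - 3) / Nat.gcd (m - 2) (m - 3)) /
      Nat.gcd (m - 1) ((m - 2) * (m - 3) / Nat.gcd (m - 2) (m - 3)) = (m - 1) * ((m - 2) * (m - 3)) := by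
  obtain ⟨k, rfl⟩ : ∃ k, m = k + 4 := ⟨m - 4, by omega⟩
  simp only [show k+4-1 = k+3 from by omega, show k+4-2 = k+2 from by omega,
    show k+4-3 = k+1 from by omega]
  rw [show Nat.gcd (k+2) (k+1) = 1 from cop_succ (k+1), Nat.div_one]
  have c1 : Nat.Coprime (k+3) (k+2) := cop_succ (k+2)
  have c2 : Nat.Coprime (k+3) (k+1) := by
    rw [Nat.Coprime, show k+3 = 2 + (k+1) from by omega, Nat.gcd_add_self_left]
    exact (Nat.coprime_two_left).mpr (Nat.odd_iff.mpr (by omega))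
  rw [Nat.Coprime.gcd_eq_one (Nat.Coprime.mul_right c1 c2), Nat.div_one]

-- A's even-branch l1 when 3 ∤ m: lcm(m, lcm(m-1, m-3)) = m(m-1)(m-3).
theorem even_branch_l1_no3 (m : Nat) (h : 4 ≤ m) (he : 2 ∣ m) (h3 : ¬ 3 ∣ m) :
    m * ((m - 1) * (m - 3) / Nat.gcd (m - 1) (m - 3)) /
      Nat.gcd m ((m - 1) * (m - 3) / Nat.gcd (m - 1) (m - 3)) = m * ((m - 1) * (m - 3)) := by
  obtain ⟨k, rfl⟩ : ∃ k, m = k + 4 := ⟨m - 4, by omega⟩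
  simp only [show k+4-1 = k+3 from by omega, show k+4-3 = k+1 from by omega]
  have gin : Nat.gcd (k+3) (k+1) = 1 := by
    rw [show k+3 = 2 + (k+1) from by omega, Nat.gcd_add_self_left]
    exact (Nat.coprime_two_left).mpr (Nat.odd_iff.mpr (by omega))
  rw [gin, Nat.div_one]
  have c1 : Nat.Coprime (k+4) (k+3) := cop_succ (k+3)
  have c2 : Nat.Coprime (k+4) (k+1) := by
    rw [Nat.Coprime, show k+4 = 3 + (k+1) from by omega, Nat.gcd_add_self_left]
    exact (Nat.Prime.coprime_iff_not_dvd (by norm_num)).mpr (by omega)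
  rw [Nat.Coprime.gcd_eq_one (Nat.Coprime.mul_right c1 c2), Nat.div_one]

-- A's even-branch l1 when 3 ∣ m: lcm(m, lcm(m-1, m-3)) = (m/3)(m-1)(m-3).
theorem even_branch_l1_3 (m : Nat) (h : 4 ≤ m) (he : 2 ∣ m) (h3 : 3 ∣ m) :
    m * ((m - 1) * (m - 3) / Nat.gcd (m - 1) (m - 3)) /
      Nat.gcd m ((m - 1) * (m - 3) / Nat.gcd (m - 1) (m - 3)) = m / 3 * ((m - 1) * (m - 3)) := by
  obtain ⟨k, rfl⟩ : ∃ k, m = k + 4 := ⟨m - 4, by omega⟩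
  simp only [show k+4-1 = k+3 from by omega, show k+4-3 = k+1 from by omega]
  have gin : Nat.gcd (k+3) (k+1) = 1 := by
    rw [show k+3 = 2 + (k+1) from by omega, Nat.gcd_add_self_left]
    exact (Nat.coprime_two_left).mpr (Nat.odd_iff.mpr (by omega))
  rw [gin, Nat.div_one]
  have c1 : Nat.Coprime (k+4) (k+3) := cop_succ (k+3)
  have g3 : Nat.gcd (k+4) (k+1) = 3 := by
    rw [show k+4 = 3 + (k+1) from by omega, Nat.gcd_add_self_left]
    exact Nat.gcd_eq_left (by omega)
  rw [Nat.gcd_mul_right_right_of_gcd_eq_one c1, g3, Nat.mul_div_right_comm (by omega)]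

theorem lcmTriplets_eq (n : Int) (hpre : 1 ≤ n) : lcmTriplets n = lcmTriplets_alt n := by
  by_cases h1 : n = 1
  · subst h1; decide
  by_cases h2 : n = 2
  · subst h2; decide
  by_cases h3 : n = 3
  · subst h3; decide
  obtain ⟨m, rfl⟩ : ∃ m : Nat, n = (m : Int) := ⟨n.toNat, by omega⟩
  have hm4 : 4 ≤ m := by omega
  have e1 : ((m : Int) - 1) = ((m - 1 : Nat) : Int) := by omega
  have e2 : ((m : Int) - 2) = ((m - 2 : Nat) : Int) := by omega
  have e3 : ((m : Int) - 3) = ((m - 3 : Nat) : Int) := by omega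
  have hmod2 : PySem.Int.mod (m : Int) 2 = ((m % 2 : Nat) : Int) := by
    exact_mod_cast PySem.Int.mod_natCast m 2
  have hmod3 : PySem.Int.mod (m : Int) 3 = ((m % 3 : Nat) : Int) := by
    exact_mod_cast PySem.Int.mod_natCast m 3
  by_cases ho : 2 ∣ m
  · -- even case
    have hc2 : ¬ (PySem.Int.mod (m : Int) 2 ≠ 0) := by rw [hmod2]; omega
    have hc2' : ¬ (PySem.Int.mod (m : Int) 2 = 1) := by rw [hmod2]; omega
    rw [lcmTriplets, if_neg h1, if_neg h2, if_neg h3, if_neg hc2,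
        lcmTriplets_alt, if_neg h1, if_neg h2, if_neg hc2']
    simp only [e1, e2, e3, pyLcmA_natCast]
    rw [even_branch_l2 m hm4 ho, even_branch_l3 m hm4 ho]
    by_cases h3d : 3 ∣ m
    · have hc3 : ¬ (PySem.Int.mod (m : Int) 3 ≠ 0) := by rw [hmod3]; omega
      rw [if_neg hc3, even_branch_l1_3 m hm4 ho h3d]
      obtain ⟨s, rfl⟩ : ∃ s, m = 6*s+6 := ⟨m/6 - 1, by omega⟩
      simp only [show 6*s+6-1 = 6*s+5 from by omega, show 6*s+6-2 = 6*s+4 from by omega,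
        show 6*s+6-3 = 6*s+3 from by omega, show (6*s+6)/3 = 2*s+2 from by omega,
        show (6*s+6)/2 = 3*s+3 from by omega]
      have hA : (2*s+2) * ((6*s+5) * (6*s+3)) ≤ (6*s+5) * ((6*s+4) * (6*s+3)) := calc
        (2*s+2) * ((6*s+5) * (6*s+3)) ≤ (6*s+4) * ((6*s+5) * (6*s+3)) :=
          mul_le_mul_right' (by omega) _
        _ = (6*s+5) * ((6*s+4) * (6*s+3)) := by ring
      have hB : (3*s+3) * ((6*s+5) * (6*s+4)) ≤ (6*s+5) * ((6*s+4) * (6*s+3)) := calc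
        (3*s+3) * ((6*s+5) * (6*s+4)) ≤ (6*s+3) * ((6*s+5) * (6*s+4)) :=
          mul_le_mul_right' (by omega) _
        _ = (6*s+5) * ((6*s+4) * (6*s+3)) := by ring
      rw [← Nat.cast_max, ← Nat.cast_max, max_eq_right hB, max_eq_right hA]
      push_cast; ring
    · have hc3 : (PySem.Int.mod (m : Int) 3 ≠ 0) := by rw [hmod3]; omega
      rw [if_pos hc3, even_branch_l1_no3 m hm4 ho h3d]
      obtain ⟨i, rfl⟩ : ∃ i, m = 2*i+4 := ⟨m/2 - 2, by omega⟩
      simp only [show 2*i+4-1 = 2*i+3 from by omega, show 2*i+4-2 = 2*i+2 from by omega,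
        show 2*i+4-3 = 2*i+1 from by omega, show (2*i+4)/2 = i+2 from by omega]
      have hA : (i+2) * ((2*i+3) * (2*i+2)) ≤ (2*i+4) * ((2*i+3) * (2*i+1)) := calc
        (i+2) * ((2*i+3) * (2*i+2)) = (2*i+3) * ((i+2) * (2*i+2)) := by ring
        _ ≤ (2*i+3) * ((2*i+4) * (2*i+1)) := mul_le_mul_left' (by nlinarith) _
        _ = (2*i+4) * ((2*i+3) * (2*i+1)) := by ring
      have hB : (2*i+3) * ((2*i+2) * (2*i+1)) ≤ (2*i+4) * ((2*i+3) * (2*i+1)) := calc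
        (2*i+3) * ((2*i+2) * (2*i+1)) = (2*i+2) * ((2*i+3) * (2*i+1)) := by ring
        _ ≤ (2*i+4) * ((2*i+3) * (2*i+1)) := mul_le_mul_right' (by omega) _
      rw [← Nat.cast_max, ← Nat.cast_max, max_eq_left (max_le hA hB)]
      push_cast; ring
  · -- odd case
    have hc2 : (PySem.Int.mod (m : Int) 2 ≠ 0) := by rw [hmod2]; omega
    have hc2' : (PySem.Int.mod (m : Int) 2 = 1) := by rw [hmod2]; omega
    rw [lcmTriplets, if_neg h1, if_neg h2, if_neg h3, if_pos hc2,
        lcmTriplets_alt, if_neg h1, if_neg h2, if_pos hc2']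
    rw [e1, e2, pyLcmA_natCast, pyLcmA_natCast, odd_branch m (by omega) ho]
    push_cast; ring

-- ===== VERDICT (by name: the statement is the Claim_ definition above) =====
theorem lcmTriplets_spec : Claim_equal_lcmTriplets := by
  intro n _ hpre
  exact lcmTriplets_eq n hpre
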